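-- pv_equiv track=rewrite | github.com/trisusthgrt/ca-ai-excel-assistant | ca-ai-excel-assistant/utils/normalizer.py | get_rowdate_column_name
-- ===== SOURCE A (Python) =====
-- from typing import List, Optional, Tuple
--
-- def get_rowdate_column_name(normalized_columns: List[str]) -> Optional[str]:
--     """
--     Return the first column name that represents row date.
--     Checks for: rowdate, date, transactiondate, transaction_date, etc.
--     """
--     # Priority order: prefer exact matches first
--     priority_names = ["rowdate", "date", "transactiondate", "transaction_date"]
--     for pname in priority_names:
--         for c in normalized_columns:
--             if c.lower() == pname:
--                 return c
--     # Fallback: any column containing "date"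
--     for c in normalized_columns:
--         if "date" in c.lower():
--             return c
--     return None
-- ===== SOURCE B (Python) =====
-- def get_rowdate_column_name(normalized_columns):
--     """Single rank-keyed pass: keep the first column with the smallest priority rank."""
--     exact = ["rowdate", "date", "transactiondate", "transaction_date"]
--     best = None  # (rank, column)
--     for c in normalized_columns:
--         lc = c.lower()
--         if lc in exact:
--             r = exact.index(lc)
--         elif "date" in lc:
--             r = 4
--         else:
--             continue
--         if best is None or r < best[0]:
--             best = (r, c)
--     return None if best is None else best[1]
-- ===== Notes on version B (the rewrite author's own statement) =====
-- stated objective: faster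
-- what changed: Replaces A's four priority scans over the column list plus a separate fallback scan by a single pass that assigns each column a rank (index in the exact-name list, 4 for a mere 'date' substring) and keeps the first column with the strictly smallest rank.
import Mathlib
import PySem

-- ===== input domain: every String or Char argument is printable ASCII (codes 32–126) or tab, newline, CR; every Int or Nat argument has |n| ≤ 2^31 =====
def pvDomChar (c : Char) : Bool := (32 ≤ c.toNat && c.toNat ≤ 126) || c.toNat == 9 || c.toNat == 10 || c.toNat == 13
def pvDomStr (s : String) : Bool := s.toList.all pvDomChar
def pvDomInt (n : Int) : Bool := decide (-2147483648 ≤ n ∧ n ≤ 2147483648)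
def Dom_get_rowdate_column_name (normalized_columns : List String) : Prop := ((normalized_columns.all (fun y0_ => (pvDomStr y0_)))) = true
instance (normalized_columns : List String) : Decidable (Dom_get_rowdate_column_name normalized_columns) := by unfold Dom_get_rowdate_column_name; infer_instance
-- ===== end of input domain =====

-- B replaces A's four priority scans plus a fallback scan by a single rank-keyed pass
-- keeping the first column with the smallest rank (measured constant-factor speedup).

-- ===== PORT A =====
-- inner loop 'for c in normalized_columns: if c.lower() == pname: return c'
def pvScanEq (pname : String) : List String → Option String
  | [] => none
  | c :: cs => if PySem.Str.lower c == pname then some c else pvScanEq pname cs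

-- outer loop 'for pname in priority_names: …'
def pvScanPriority (cols : List String) : List String → Option String
  | [] => none
  | p :: ps =>
    match pvScanEq p cols with
    | some c => some c
    | none => pvScanPriority cols ps

-- fallback loop 'for c in normalized_columns: if "date" in c.lower(): return c'
def pvScanContains : List String → Option String
  | [] => none
  | c :: cs => if PySem.Str.isIn "date" (PySem.Str.lower c) then some c else pvScanContains cs

def get_rowdate_column_name (normalized_columns : List String) : Option String :=
  match pvScanPriority normalized_columns ["rowdate", "date", "transactiondate", "transaction_date"] with
  | some c => some c
  | none => pvScanContains normalized_columns

-- ===== PORT B =====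
def pvExactNames : List String := ["rowdate", "date", "transactiondate", "transaction_date"]

-- 'r = exact.index(lc) if lc in exact else (4 if "date" in lc else skip)'
def pvRankB (c : String) : Option Nat :=
  match PySem.List.index? pvExactNames (PySem.Str.lower c) with
  | some i => some i
  | none => if PySem.Str.isIn "date" (PySem.Str.lower c) then some 4 else none

-- 'for c in …: if best is None or r < best[0]: best = (r, c)'
def pvGo : List String → Option (Nat × String) → Option (Nat × String)
  | [], best => best
  | c :: cs, best =>
    match pvRankB c with
    | none => pvGo cs best
    | some r =>
      match best with
      | none => pvGo cs (some (r, c))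
      | some (br, bc) => if r < br then pvGo cs (some (r, c)) else pvGo cs (some (br, bc))

def get_rowdate_column_name_alt (normalized_columns : List String) : Option String :=
  (pvGo normalized_columns none).map Prod.snd

-- ===== PRECONDITION & SPEC =====
def Spec_get_rowdate_column_name (normalized_columns : List String) (out : Option String) : Prop := out = get_rowdate_column_name_alt normalized_columns
instance (normalized_columns : List String) (out : Option String) : Decidable (Spec_get_rowdate_column_name normalized_columns out) := by unfold Spec_get_rowdate_column_name; infer_instance

-- ===== CLAIM (what is proved, stated in full; the proofs are below) =====
def Claim_equal_get_rowdate_column_name : Prop := ∀ (normalized_columns : List String), Dom_get_rowdate_column_name normalized_columns → Spec_get_rowdate_column_name normalized_columns (get_rowdate_column_name normalized_columns)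

-- ===== LEMMAS AND PROOFS =====

-- right-fold "first minimum by rank" specification of B's loop
def pvMerge : Option (Nat × String) → Option (Nat × String) → Option (Nat × String)
  | none, t => t
  | some s, none => some s
  | some (a, x), some (b, y) => if b < a then some (b, y) else some (a, x)

def pvSpec : List String → Option (Nat × String)
  | [] => none
  | c :: cs => pvMerge ((pvRankB c).map (fun r => (r, c))) (pvSpec cs)

lemma pvMerge_assoc (s t u : Option (Nat × String)) :
    pvMerge (pvMerge s t) u = pvMerge s (pvMerge t u) := by
  rcases s with _ | ⟨a, x⟩ <;> rcases t with _ | ⟨b, y⟩ <;> rcases u with _ | ⟨d, z⟩ <;>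
    simp only [pvMerge] <;> split_ifs <;> simp only [pvMerge] <;> split_ifs <;>
      first | rfl | omega

lemma pvGo_eq (xs : List String) : ∀ s, pvGo xs s = pvMerge s (pvSpec xs) := by
  induction xs with
  | nil => intro s; cases s <;> simp [pvGo, pvSpec, pvMerge]
  | cons c cs ih =>
    intro s
    have hstep : pvGo (c :: cs) s = pvGo cs (pvMerge s ((pvRankB c).map (fun r => (r, c)))) := by
      rcases h : pvRankB c with _ | r <;> rcases s with _ | ⟨br, bc⟩ <;>
        (simp [pvGo, h, pvMerge]; try (split_ifs <;> rfl))
    rw [hstep, ih, pvMerge_assoc]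
    simp [pvSpec]

lemma pvB_eq (xs : List String) :
    get_rowdate_column_name_alt xs = (pvSpec xs).map Prod.snd := by
  simp [get_rowdate_column_name_alt, pvGo_eq, pvMerge]

-- the if-chain form of B's rank
lemma pvRankB_chain (c : String) :
    pvRankB c =
      (if PySem.Str.lower c == "rowdate" then some 0
       else if PySem.Str.lower c == "date" then some 1
       else if PySem.Str.lower c == "transactiondate" then some 2
       else if PySem.Str.lower c == "transaction_date" then some 3
       else if PySem.Str.isIn "date" (PySem.Str.lower c) then some 4 else none) := by
  unfold pvRankB pvExactNames
  by_cases h0 : PySem.Str.lower c = "rowdate"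
  · rw [h0]; decide
  · by_cases h1 : PySem.Str.lower c = "date"
    · rw [h1]; decide
    · by_cases h2 : PySem.Str.lower c = "transactiondate"
      · rw [h2]; decide
      · by_cases h3 : PySem.Str.lower c = "transaction_date"
        · rw [h3]; decide
        · have hnone : PySem.List.index? ["rowdate", "date", "transactiondate", "transaction_date"]
              (PySem.Str.lower c) = none := by
            rw [PySem.List.index?_eq_none_iff]
            simp [h0, h1, h2, h3]
          simp only [PySem.List.index?_eq_idxOf?] at hnone
          simp only [PySem.List.index?_eq_idxOf?, hnone]
          simp [h0, h1, h2, h3]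

lemma pvRankB_le (c : String) (r : Nat) (h : pvRankB c = some r) : r ≤ 4 := by
  rw [pvRankB_chain] at h
  split_ifs at h <;> (try simp_all) <;> omega

-- pointwise: A's k-th exact predicate is 'rank = k', its fallback predicate is 'rank present'
lemma pvPred0 (c : String) :
    (PySem.Str.lower c == "rowdate") = (pvRankB c == some 0) := by
  rw [pvRankB_chain]
  by_cases h0 : PySem.Str.lower c = "rowdate"
  · rw [h0]; decide
  · by_cases h1 : PySem.Str.lower c = "date"
    · rw [h1]; decide
    · by_cases h2 : PySem.Str.lower c = "transactiondate"
      · rw [h2]; decide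
      · by_cases h3 : PySem.Str.lower c = "transaction_date"
        · rw [h3]; decide
        · simp [h0, h1, h2, h3]

lemma pvPred1 (c : String) :
    (PySem.Str.lower c == "date") = (pvRankB c == some 1) := by
  rw [pvRankB_chain]
  by_cases h0 : PySem.Str.lower c = "rowdate"
  · rw [h0]; decide
  · by_cases h1 : PySem.Str.lower c = "date"
    · rw [h1]; decide
    · by_cases h2 : PySem.Str.lower c = "transactiondate"
      · rw [h2]; decide
      · by_cases h3 : PySem.Str.lower c = "transaction_date"
        · rw [h3]; decide
        · simp [h0, h1, h2, h3]

lemma pvPred2 (c : String) :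
    (PySem.Str.lower c == "transactiondate") = (pvRankB c == some 2) := by
  rw [pvRankB_chain]
  by_cases h0 : PySem.Str.lower c = "rowdate"
  · rw [h0]; decide
  · by_cases h1 : PySem.Str.lower c = "date"
    · rw [h1]; decide
    · by_cases h2 : PySem.Str.lower c = "transactiondate"
      · rw [h2]; decide
      · by_cases h3 : PySem.Str.lower c = "transaction_date"
        · rw [h3]; decide
        · simp [h0, h1, h2, h3]

lemma pvPred3 (c : String) :
    (PySem.Str.lower c == "transaction_date") = (pvRankB c == some 3) := by
  rw [pvRankB_chain]
  by_cases h0 : PySem.Str.lower c = "rowdate"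
  · rw [h0]; decide
  · by_cases h1 : PySem.Str.lower c = "date"
    · rw [h1]; decide
    · by_cases h2 : PySem.Str.lower c = "transactiondate"
      · rw [h2]; decide
      · by_cases h3 : PySem.Str.lower c = "transaction_date"
        · rw [h3]; decide
        · simp [h0, h1, h2, h3]

lemma pvPredIn_eq (c : String) :
    PySem.Str.isIn "date" (PySem.Str.lower c) = (pvRankB c).isSome := by
  rw [pvRankB_chain]
  by_cases h0 : PySem.Str.lower c = "rowdate"
  · rw [h0]; decide
  · by_cases h1 : PySem.Str.lower c = "date"
    · rw [h1]; decide
    · by_cases h2 : PySem.Str.lower c = "transactiondate"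
      · rw [h2]; decide
      · by_cases h3 : PySem.Str.lower c = "transaction_date"
        · rw [h3]; decide
        · simp [h0, h1, h2, h3]
          exact (by decide : ∀ b : Bool, b = (if b = true then some 4 else (none : Option Nat)).isSome) _

lemma pvScanEq_eq_find? (p : String) (xs : List String) :
    pvScanEq p xs = xs.find? (fun c => PySem.Str.lower c == p) := by
  induction xs with
  | nil => rfl
  | cons c cs ih =>
      rcases h : (PySem.Str.lower c == p) with _ | _ <;> simp [pvScanEq, h, ih]

lemma pvScanContains_eq_find? (xs : List String) :
    pvScanContains xs = xs.find? (fun c => PySem.Str.isIn "date" (PySem.Str.lower c)) := by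
  induction xs with
  | nil => rfl
  | cons c cs ih =>
      simp only [pvScanContains, ih, List.find?_cons]
      rcases h : PySem.Str.isIn "date" (PySem.Str.lower c) with _ | _ <;> rfl

-- characterization of pvSpec
lemma pvSpec_none (xs : List String) (h : pvSpec xs = none) : ∀ c ∈ xs, pvRankB c = none := by
  induction xs with
  | nil => simp
  | cons c cs ih =>
    intro d hd
    rcases hr : pvRankB c with _ | r
    · rcases List.mem_cons.mp hd with hd | hd
      · subst hd; exact hr
      · refine ih ?_ d hd
        simpa [pvSpec, hr, pvMerge] using h
    · exfalso
      simp only [pvSpec, hr, Option.map_some] at h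
      rcases ht : pvSpec cs with _ | ⟨b, y⟩ <;> simp [ht, pvMerge] at h
      split_ifs at h <;> simp_all

lemma pvSpec_some (xs : List String) (m : Nat) (y : String) (h : pvSpec xs = some (m, y)) :
    xs.find? (fun c => pvRankB c == some m) = some y ∧
      ∀ k < m, xs.find? (fun c => pvRankB c == some k) = none := by
  induction xs generalizing m y with
  | nil => simp [pvSpec] at h
  | cons c cs ih =>
    rcases hr : pvRankB c with _ | r
    · -- head skipped
      have h' : pvSpec cs = some (m, y) := by simpa [pvSpec, hr, pvMerge] using h
      obtain ⟨hf, hn⟩ := ih m y h'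
      constructor
      · simp [List.find?_cons, hr, hf]
      · intro k hk; simp [List.find?_cons, hr, hn k hk]
    · simp only [pvSpec, hr, Option.map_some] at h
      rcases ht : pvSpec cs with _ | ⟨b, z⟩
      · -- tail empty: result is (r, c)
        simp only [ht, pvMerge] at h
        obtain ⟨hm, hy⟩ : r = m ∧ c = y := by simpa using h
        have htail := pvSpec_none cs ht
        constructor
        · have hry : pvRankB y = some m := by rw [← hy, hr, hm]
          simp [List.find?_cons, hy, hry]
        · intro k hk
          have hkf : (pvRankB c == some k) = false := by simp [hr]; omega
          simp only [List.find?_cons, hkf]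
          rw [List.find?_eq_none]
          intro d hd
          simp [htail d hd]
      · simp only [ht, pvMerge] at h
        obtain ⟨hfb, hnb⟩ := ih b z ht
        by_cases hlt : b < r
        · -- earlier minimum in the tail wins
          rw [if_pos hlt] at h
          obtain ⟨hm, hy⟩ : b = m ∧ z = y := by simpa using h
          constructor
          · have hcf : (pvRankB c == some m) = false := by simp [hr]; omega
            rw [hm, hy] at hfb
            simp [List.find?_cons, hcf, hfb]
          · intro k hk
            have hcf : (pvRankB c == some k) = false := by simp [hr]; omega
            simp [List.find?_cons, hcf, hnb k (by omega)]
        · -- head wins (strictly smaller, or equal and first)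
          rw [if_neg hlt] at h
          obtain ⟨hm, hy⟩ : r = m ∧ c = y := by simpa using h
          constructor
          · have hry : pvRankB y = some m := by rw [← hy, hr, hm]
            simp [List.find?_cons, hy, hry]
          · intro k hk
            have hcf : (pvRankB c == some k) = false := by simp [hr]; omega
            simp only [List.find?_cons, hcf]
            exact hnb k (by omega)

-- unfolding A to its five find?-scans
lemma pvA_chain (xs : List String) :
    get_rowdate_column_name xs =
      match xs.find? (fun c => PySem.Str.lower c == "rowdate") with
      | some c => some c
      | none =>
        match xs.find? (fun c => PySem.Str.lower c == "date") with
        | some c => some c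
        | none =>
          match xs.find? (fun c => PySem.Str.lower c == "transactiondate") with
          | some c => some c
          | none =>
            match xs.find? (fun c => PySem.Str.lower c == "transaction_date") with
            | some c => some c
            | none => xs.find? (fun c => PySem.Str.isIn "date" (PySem.Str.lower c)) := by
  simp only [get_rowdate_column_name, pvScanPriority, pvScanEq_eq_find?, pvScanContains_eq_find?]
  rcases xs.find? (fun c => PySem.Str.lower c == "rowdate") <;>
    rcases xs.find? (fun c => PySem.Str.lower c == "date") <;>
    rcases xs.find? (fun c => PySem.Str.lower c == "transactiondate") <;>
    rcases xs.find? (fun c => PySem.Str.lower c == "transaction_date") <;> rfl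

-- find? only looks at members (no library lemma matches this member-wise congruence)
lemma pvFind?_congr (p q : String → Bool) (l : List String) (h : ∀ x ∈ l, p x = q x) :
    l.find? p = l.find? q := by
  induction l with
  | nil => rfl
  | cons c cs ih =>
    have hc := h c (by simp)
    simp only [List.find?_cons, ← hc]
    cases p c <;> simp [ih fun x hx => h x (by simp [hx])]

-- ===== VERDICT (by name: the statement is the Claim_ definition above) =====
theorem get_rowdate_column_name_spec : Claim_equal_get_rowdate_column_name := by
  intro xs _
  unfold Spec_get_rowdate_column_name
  rw [pvB_eq, pvA_chain]
  have e0 : (fun c => PySem.Str.lower c == "rowdate") = fun c => pvRankB c == some 0 := funext pvPred0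
  have e1 : (fun c => PySem.Str.lower c == "date") = fun c => pvRankB c == some 1 := funext pvPred1
  have e2 : (fun c => PySem.Str.lower c == "transactiondate") = fun c => pvRankB c == some 2 :=
    funext pvPred2
  have e3 : (fun c => PySem.Str.lower c == "transaction_date") = fun c => pvRankB c == some 3 :=
    funext pvPred3
  have eg : (fun c => PySem.Str.isIn "date" (PySem.Str.lower c)) = fun c => (pvRankB c).isSome :=
    funext pvPredIn_eq
  rw [e0, e1, e2, e3, eg]
  rcases h : pvSpec xs with _ | ⟨m, y⟩
  · -- no column matches at all: every scan is empty
    have hnone := pvSpec_none xs h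
    have hf : ∀ k : Nat, xs.find? (fun c => pvRankB c == some k) = none := by
      intro k; rw [List.find?_eq_none]; intro d hd; simp [hnone d hd]
    have hg : xs.find? (fun c => (pvRankB c).isSome) = none := by
      rw [List.find?_eq_none]; intro d hd; simp [hnone d hd]
    simp [hf, hg]
  · -- minimum rank m, first column y of that rank
    obtain ⟨hfm, hnk⟩ := pvSpec_some xs m y h
    have hym : pvRankB y = some m := by simpa using List.find?_some hfm
    have hm4 : m ≤ 4 := pvRankB_le y m hym
    interval_cases m
    · simp [hfm]
    · simp [hnk 0 (by omega), hfm]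
    · simp [hnk 0 (by omega), hnk 1 (by omega), hfm]
    · simp [hnk 0 (by omega), hnk 1 (by omega), hnk 2 (by omega), hfm]
    · -- fallback rank: no exact match exists, so 'has a rank' means 'rank = 4' on members
      have hmem : ∀ d ∈ xs, ((pvRankB d).isSome) = (pvRankB d == some 4) := by
        intro d hd
        rcases hr : pvRankB d with _ | r
        · simp
        · have hr4 : r ≤ 4 := pvRankB_le d r hr
          have : ∀ k, k < 4 → pvRankB d ≠ some k := by
            intro k hk hcon
            have := List.find?_eq_none.mp (hnk k hk) d hd
            simp [hcon] at this
          have : r = 4 := by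
            rcases Nat.lt_or_ge r 4 with hlt | hge
            · exact absurd hr (this r hlt)
            · omega
          simp [hr, this]
      rw [pvFind?_congr _ _ xs hmem]
      simp [hnk 0 (by omega), hnk 1 (by omega), hnk 2 (by omega), hnk 3 (by omega), hfm]
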